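-- pv_equiv track=rewrite | github.com/ctc316/algorithm-python | Lintcode/G_Practice/Tag_Intervals/843. Digital Flip.py | flipDigit
-- ===== SOURCE A (Python) =====
-- def flipDigit(nums):
--     l_zeros = 0
--     l_ones = 0
--     r_zeros = 0
--     r_ones = 0
--     for num in nums:
--         if num == 1:
--             r_ones += 1
--         elif num == 0:
--             r_zeros += 1
--
--     minimum = r_ones
--     for num in nums:
--         if num == 1:
--             r_ones -= 1
--             l_ones += 1
--         elif num == 0:
--             r_zeros -= 1
--             l_zeros += 1
--         minimum = min(minimum, l_zeros + r_ones)
--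
--     return minimum
-- ===== SOURCE B (Python) =====
-- def flipDigit(nums):
--     zeros = 0
--     flips = 0
--     for num in nums:
--         if num == 0:
--             zeros += 1
--         elif num == 1:
--             flips = min(flips + 1, zeros)
--     return flips
-- ===== Notes on version B (the rewrite author's own statement) =====
-- stated objective: simpler
-- what changed: Replaces A's two passes over the list and five counters (left/right zero/one counts plus a minimum over all split points) by a single-pass DP keeping only the zeros seen so far and the running optimal flip count.
import Mathlib
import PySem

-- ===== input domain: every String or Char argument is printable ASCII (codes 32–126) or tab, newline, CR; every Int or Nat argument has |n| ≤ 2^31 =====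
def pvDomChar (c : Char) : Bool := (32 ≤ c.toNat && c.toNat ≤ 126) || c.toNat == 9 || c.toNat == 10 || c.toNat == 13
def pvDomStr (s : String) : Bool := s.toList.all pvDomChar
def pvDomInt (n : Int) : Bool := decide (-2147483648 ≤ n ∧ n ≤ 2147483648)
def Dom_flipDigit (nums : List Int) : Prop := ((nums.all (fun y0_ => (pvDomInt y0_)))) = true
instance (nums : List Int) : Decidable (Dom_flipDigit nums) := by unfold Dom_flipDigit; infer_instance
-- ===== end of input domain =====

-- B replaces A's two passes and five counters by a single-pass DP (zeros seen so far + running optimum); same O(n) cost, simpler.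


-- ===== PORT A =====
-- first for-loop of A: counts (r_ones, r_zeros)
def flipACount : List Int → Int → Int → Int × Int
  | [], ro, rz => (ro, rz)
  | x :: t, ro, rz =>
    if x = 1 then flipACount t (ro + 1) rz
    else if x = 0 then flipACount t ro (rz + 1)
    else flipACount t ro rz

-- second for-loop of A: state (l_zeros, l_ones, r_zeros, r_ones, minimum)
def flipALoop : List Int → Int → Int → Int → Int → Int → Int
  | [], _, _, _, _, m => m
  | x :: t, lz, lo, rz, ro, m =>
    if x = 1 then flipALoop t lz (lo + 1) rz (ro - 1) (min m (lz + (ro - 1)))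
    else if x = 0 then flipALoop t (lz + 1) lo (rz - 1) ro (min m ((lz + 1) + ro))
    else flipALoop t lz lo rz ro (min m (lz + ro))

def flipDigit (nums : List Int) : Int :=
  let c := flipACount nums 0 0
  flipALoop nums 0 0 c.2 c.1 c.1

-- ===== PORT B =====
-- B's single loop: state (zeros, flips)
def flipBLoop : List Int → Int → Int → Int
  | [], _, f => f
  | x :: t, z, f =>
    if x = 0 then flipBLoop t (z + 1) f
    else if x = 1 then flipBLoop t z (min (f + 1) z)
    else flipBLoop t z f

def flipDigit_alt (nums : List Int) : Int := flipBLoop nums 0 0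

-- ===== PRECONDITION & SPEC =====
def Spec_flipDigit (nums : List Int) (out : Int) : Prop := out = flipDigit_alt nums
instance (nums : List Int) (out : Int) : Decidable (Spec_flipDigit nums out) := by unfold Spec_flipDigit; infer_instance

-- ===== CLAIM (what is proved, stated in full; the proofs are below) =====
def Claim_equal_flipDigit : Prop := ∀ (nums : List Int), Dom_flipDigit nums → Spec_flipDigit nums (flipDigit nums)

-- ===== LEMMAS AND PROOFS =====
-- number of 1s / 0s in a list
def c1 : List Int → Int
  | [] => 0
  | x :: t => (if x = 1 then 1 else 0) + c1 t

def c0 : List Int → Int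
  | [] => 0
  | x :: t => (if x = 0 then 1 else 0) + c0 t

-- Tm l = min over split points k = 1..|l| of (zeros in l[:k]) + (ones in l[k:])  (l nonempty)
def Tm : List Int → Int
  | [] => 0
  | [x] => if x = 0 then 1 else 0
  | x :: y :: t => (if x = 0 then 1 else 0) + min (c1 (y :: t)) (Tm (y :: t))

-- one-step unfolding lemmas (rfl), so rewriting does not unfold nested calls
theorem flipACount_cons (x : Int) (t : List Int) (ro rz : Int) :
    flipACount (x :: t) ro rz =
      if x = 1 then flipACount t (ro + 1) rz
      else if x = 0 then flipACount t ro (rz + 1)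
      else flipACount t ro rz := rfl

theorem flipALoop_cons (x : Int) (t : List Int) (lz lo rz ro m : Int) :
    flipALoop (x :: t) lz lo rz ro m =
      if x = 1 then flipALoop t lz (lo + 1) rz (ro - 1) (min m (lz + (ro - 1)))
      else if x = 0 then flipALoop t (lz + 1) lo (rz - 1) ro (min m ((lz + 1) + ro))
      else flipALoop t lz lo rz ro (min m (lz + ro)) := rfl

theorem flipBLoop_cons (x : Int) (t : List Int) (z f : Int) :
    flipBLoop (x :: t) z f =
      if x = 0 then flipBLoop t (z + 1) f
      else if x = 1 then flipBLoop t z (min (f + 1) z)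
      else flipBLoop t z f := rfl

theorem c1_cons (x : Int) (t : List Int) : c1 (x :: t) = (if x = 1 then 1 else 0) + c1 t := rfl

theorem Tm_cons (x y : Int) (s : List Int) :
    Tm (x :: y :: s) = (if x = 0 then 1 else 0) + min (c1 (y :: s)) (Tm (y :: s)) := rfl

theorem flipACount_eq : ∀ (t : List Int) (ro rz : Int),
    flipACount t ro rz = (ro + c1 t, rz + c0 t) := by
  intro t
  induction t with
  | nil => intro ro rz; simp [flipACount, c1, c0]
  | cons x t ih =>
    intro ro rz
    rw [flipACount_cons]
    by_cases h1 : x = 1 <;> by_cases h0 : x = 0 <;>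
      simp [h1, h0, ih, c1, c0, Prod.ext_iff] <;> omega

theorem flipALoop_eq : ∀ (t : List Int) (lz lo rz m : Int),
    flipALoop t lz lo rz (c1 t) m = if t = [] then m else min m (lz + Tm t) := by
  intro t
  induction t with
  | nil => intro lz lo rz m; simp [flipALoop]
  | cons x t ih =>
    intro lz lo rz m
    rw [flipALoop_cons]
    cases t with
    | nil =>
      by_cases h1 : x = 1 <;> by_cases h0 : x = 0 <;>
        simp [flipALoop, c1, Tm, h1, h0, min_def] <;> omega
    | cons y s =>
      have hne : (y :: s : List Int) ≠ []  := by simp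
      have hne2 : (x :: y :: s : List Int) ≠ [] := by simp
      by_cases h1 : x = 1 <;> by_cases h0 : x = 0
      · rw [h1] at h0; exact absurd h0 (by norm_num)
      · subst h1
        rw [if_pos rfl, show c1 (1 :: y :: s) = 1 + c1 (y :: s) from by simp [c1_cons]]
        rw [show (1:Int) + c1 (y :: s) - 1 = c1 (y :: s) by ring]
        rw [ih, if_neg hne, if_neg hne2, Tm_cons]
        norm_num
        try (simp only [min_def]; split_ifs <;> omega)
      · subst h0
        rw [if_neg (by norm_num), if_pos rfl]
        rw [show c1 ((0:Int) :: y :: s) = c1 (y :: s) from by simp [c1_cons]]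
        rw [ih, if_neg hne, if_neg hne2, Tm_cons]
        norm_num
        try (simp only [min_def]; split_ifs <;> omega)
      · rw [if_neg h1, if_neg h0]
        rw [show c1 (x :: y :: s) = c1 (y :: s) from by simp [c1_cons, h1]]
        rw [ih, if_neg hne, if_neg hne2, Tm_cons]
        simp only [h0, if_false]
        simp only [min_def]; split_ifs <;> omega

theorem flipBLoop_eq : ∀ (t : List Int) (z f : Int), f ≤ z →
    flipBLoop t z f = if t = [] then f else min (f + c1 t) (z + Tm t) := by
  intro t
  induction t with
  | nil => intro z f _; simp [flipBLoop]
  | cons x t ih =>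
    intro z f hf
    rw [flipBLoop_cons]
    cases t with
    | nil =>
      by_cases h1 : x = 1 <;> by_cases h0 : x = 0 <;>
        simp [flipBLoop, c1, Tm, h1, h0, min_def] <;> omega
    | cons y s =>
      have hne : (y :: s : List Int) ≠ [] := by simp
      have hne2 : (x :: y :: s : List Int) ≠ [] := by simp
      by_cases h1 : x = 1 <;> by_cases h0 : x = 0
      · rw [h1] at h0; exact absurd h0 (by norm_num)
      · subst h1
        rw [if_neg (by norm_num), if_pos rfl]
        rw [ih z (min (f + 1) z) (by omega), if_neg hne, if_neg hne2, Tm_cons]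
        rw [show c1 ((1:Int) :: y :: s) = 1 + c1 (y :: s) from by simp [c1_cons]]
        norm_num
        try (simp only [min_def]; split_ifs <;> omega)
      · subst h0
        rw [if_pos rfl]
        rw [ih (z + 1) f (by omega), if_neg hne, if_neg hne2, Tm_cons]
        rw [show c1 ((0:Int) :: y :: s) = c1 (y :: s) from by simp [c1_cons]]
        norm_num
        try (simp only [min_def]; split_ifs <;> omega)
      · rw [if_neg h0, if_neg h1]
        rw [ih z f hf, if_neg hne, if_neg hne2, Tm_cons]
        rw [show c1 (x :: y :: s) = c1 (y :: s) from by simp [c1_cons, h1]]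
        simp only [h0, if_false]
        simp only [min_def]; split_ifs <;> omega

-- ===== VERDICT (by name: the statement is the Claim_ definition above) =====
theorem flipDigit_spec : Claim_equal_flipDigit := by
  unfold Claim_equal_flipDigit
  intro nums _
  unfold Spec_flipDigit flipDigit flipDigit_alt
  rw [flipACount_eq]
  simp only [zero_add]
  rw [flipALoop_eq, flipBLoop_eq nums 0 0 le_rfl]
  cases nums with
  | nil => simp [c1]
  | cons x t => simp
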